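-- pv_equiv track=rewrite | github.com/hristo-grudev/SoftUni | Python Advanced/Tuples and Sets - Lab/05. SoftUni Party.py | separate_guests
-- ===== SOURCE A (Python) =====
-- def is_vip(guest):
-- 	return guest[0].isdigit()
--
-- def separate_guests(guests):
-- 	vip_guest = []
-- 	regular_guest = []
-- 	for guest in guests:
-- 		if is_vip(guest):
-- 			vip_guest.append(guest)
-- 		else:
-- 			regular_guest.append(guest)
-- 	return sorted(vip_guest), sorted(regular_guest)
-- ===== SOURCE B (Python) =====
-- def separate_guests(guests):
--     ordered = sorted(guests, key=lambda g: (not g[0].isdigit(), g))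
--     cut = sum(1 for g in guests if g[0].isdigit())
--     return ordered[:cut], ordered[cut:]
-- ===== Notes on version B (the rewrite author's own statement) =====
-- stated objective: alternative
-- what changed: B performs a single sort under the composite key (not vip, guest) so all VIPs come first, counts the VIPs, and slices the sorted list at that point, instead of A's partition into two lists followed by two separate sorts.
import Mathlib
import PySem

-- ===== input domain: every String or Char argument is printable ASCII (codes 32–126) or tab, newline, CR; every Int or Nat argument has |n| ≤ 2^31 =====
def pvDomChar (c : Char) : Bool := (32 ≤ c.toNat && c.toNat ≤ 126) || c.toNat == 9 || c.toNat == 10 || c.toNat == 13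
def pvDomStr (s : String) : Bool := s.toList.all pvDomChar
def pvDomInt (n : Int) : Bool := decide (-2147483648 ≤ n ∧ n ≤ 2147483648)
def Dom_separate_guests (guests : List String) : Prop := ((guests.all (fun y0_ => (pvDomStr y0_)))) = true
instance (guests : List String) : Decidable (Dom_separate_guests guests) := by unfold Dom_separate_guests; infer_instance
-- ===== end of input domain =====

-- B sorts the guest list ONCE under the composite key (not vip, guest), counts the VIPs
-- and slices the sorted list at that point, instead of A's partition-then-sort-each-half
-- (objective: alternative algorithm, same cost).

-- ===== PORT A =====
-- is_vip(guest) = guest[0].isdigit(); guest[0] raises IndexError on "" (excluded by Pre_),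
-- the total form uses .getD false there (unreachable under Pre_).
def pvIsVipA (guest : String) : Bool :=
  ((PySem.Str.pyGet? guest 0).map PySem.Chars.isdigit).getD false

def separate_guests (guests : List String) : List String × List String :=
  let p := guests.foldl
    (fun (acc : List String × List String) guest =>
      if pvIsVipA guest then (acc.1 ++ [guest], acc.2) else (acc.1, acc.2 ++ [guest]))
    ([], [])
  (PySem.List.sorted p.1 (fun x => x) false, PySem.List.sorted p.2 (fun x => x) false)

-- ===== PORT B =====
-- Source B: ordered = sorted(guests, key=lambda g: (not g[0].isdigit(), g)) — tuple key, ported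
-- with PySem.List.sorted2; cut = sum(1 for g in guests if g[0].isdigit()) as a fold;
-- return ordered[:cut], ordered[cut:] via PySem.List.slice.
def separate_guests_alt (guests : List String) : List String × List String :=
  let ordered := PySem.List.sorted2 guests
    (fun g => !((PySem.Str.pyGet? g 0).map PySem.Chars.isdigit).getD false)
    (fun g => g) false
  let cut : Int := guests.foldl
    (fun acc g => if ((PySem.Str.pyGet? g 0).map PySem.Chars.isdigit).getD false then acc + 1 else acc) 0
  (PySem.List.slice ordered none (some cut), PySem.List.slice ordered (some cut) none)

-- ===== PRECONDITION & SPEC =====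
-- Pre_ excludes empty-string guests, on which the Python A (and B) raise IndexError at guest[0].
def Pre_separate_guests (guests : List String) : Prop := ∀ g ∈ guests, g ≠ ""
instance (guests : List String) : Decidable (Pre_separate_guests guests) := by
  unfold Pre_separate_guests; infer_instance

def pvWitness_separate_guests : List String := ["5ive", "alice", "3ob", "carol"]

def Spec_separate_guests (guests : List String) (out : List String × List String) : Prop := out = separate_guests_alt guests
instance (guests : List String) (out : List String × List String) : Decidable (Spec_separate_guests guests out) := by unfold Spec_separate_guests; infer_instance

-- ===== CLAIM (what is proved, stated in full; the proofs are below) =====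
def Claim_equal_separate_guests : Prop := ∀ (guests : List String), Dom_separate_guests guests → Pre_separate_guests guests → Spec_separate_guests guests (separate_guests guests)

-- ===== LEMMAS AND PROOFS =====

-- the lexicographic key B's tuple key amounts to
def pvKey (g : String) : Lex (Bool × String) := toLex (!pvIsVipA g, g)

-- A's partition fold returns (prefix ++ filter p, prefix ++ filter ¬p)
theorem pvFold_partition (p : String → Bool) (xs : List String) (a b : List String) :
    xs.foldl
      (fun (acc : List String × List String) g =>
        if p g then (acc.1 ++ [g], acc.2) else (acc.1, acc.2 ++ [g])) (a, b)
      = (a ++ xs.filter p, b ++ xs.filter (fun g => !p g)) := by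
  induction xs generalizing a b with
  | nil => simp
  | cons x xs ih =>
    by_cases h : p x <;> simp [h, ih, List.append_assoc]

-- B's tuple-key comparison is the strict lexicographic order on (Bool, String)
theorem pvLex (x y : Bool) (a b : String) :
    (decide (x < y) || (!decide (y < x) && decide (a < b)))
      = decide (toLex (x, a) < toLex (y, b)) := by
  cases x <;> cases y <;> simp [Prod.Lex.lt_iff]

-- hence sorted2 with a Bool first key and the identity second key is 'sorted' under the lex key
theorem pvSorted2_gen (k1 : String → Bool) (xs : List String) :
    PySem.List.sorted2 xs k1 (fun g => g) false
      = PySem.List.sorted xs (fun g => toLex (k1 g, g)) false := by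
  rw [PySem.List.sorted_eq_foldl_insertBy]
  show List.foldl
      (fun acc x => PySem.List.insertBy
        (fun a b => decide (k1 a < k1 b) || (!decide (k1 b < k1 a) && decide (a < b))) x acc)
      [] xs = _
  have h : (fun a b : String =>
        decide (k1 a < k1 b) || (!decide (k1 b < k1 a) && decide (a < b)))
      = fun a b : String => decide (toLex (k1 a, a) < toLex (k1 b, b)) := by
    funext a b
    exact pvLex (k1 a) (k1 b) a b
  rw [h]

-- B's sorted2 call, with its inline key, is 'sorted' under pvKey
theorem pvSorted2_eq_sorted_key (xs : List String) :
    PySem.List.sorted2 xs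
      (fun g => !((PySem.Str.pyGet? g 0).map PySem.Chars.isdigit).getD false)
      (fun g => g) false
      = PySem.List.sorted xs pvKey false := by
  exact pvSorted2_gen (fun g => !pvIsVipA g) xs

theorem pvKey_injective : Function.Injective pvKey := by
  intro a b h
  simpa using congrArg (fun z => (ofLex z).2) h

-- sorting under pvKey is: sorted VIPs first, then sorted regulars
theorem pvSorted_key_eq_append (xs : List String) :
    PySem.List.sorted xs pvKey false
      = PySem.List.sorted (xs.filter pvIsVipA) (fun x => x) false
        ++ PySem.List.sorted (xs.filter (fun g => !pvIsVipA g)) (fun x => x) false := by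
  apply PySem.List.eq_of_perm_of_pairwise_le_of_injective pvKey pvKey_injective
  · exact (PySem.List.sorted_perm xs pvKey false).trans
      (((PySem.List.sorted_perm _ (fun x : String => x) false).append
        (PySem.List.sorted_perm _ (fun x : String => x) false)).trans
        (List.filter_append_perm pvIsVipA xs)).symm
  · exact PySem.List.sorted_pairwise xs pvKey
  · rw [List.pairwise_append]
    refine ⟨?_, ?_, ?_⟩
    · apply List.Pairwise.imp_of_mem
        (R := fun a b : String => (fun x : String => x) a ≤ (fun x : String => x) b)
      · intro a b ha hb hab
        have hva : pvIsVipA a = true := by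
          have := (PySem.List.mem_sorted _ _ _ _).1 ha
          exact (List.mem_filter.1 this).2
        have hvb : pvIsVipA b = true := by
          have := (PySem.List.mem_sorted _ _ _ _).1 hb
          exact (List.mem_filter.1 this).2
        simp [pvKey, hva, hvb, Prod.Lex.le_iff, hab]
      · exact PySem.List.sorted_pairwise _ (fun x : String => x)
    · apply List.Pairwise.imp_of_mem
        (R := fun a b : String => (fun x : String => x) a ≤ (fun x : String => x) b)
      · intro a b ha hb hab
        have hva : pvIsVipA a = false := by
          have := (PySem.List.mem_sorted _ _ _ _).1 ha
          simpa using (List.mem_filter.1 this).2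
        have hvb : pvIsVipA b = false := by
          have := (PySem.List.mem_sorted _ _ _ _).1 hb
          simpa using (List.mem_filter.1 this).2
        simp [pvKey, hva, hvb, Prod.Lex.le_iff, hab]
      · exact PySem.List.sorted_pairwise _ (fun x : String => x)
    · intro a ha b hb
      have hva : pvIsVipA a = true := by
        have := (PySem.List.mem_sorted _ _ _ _).1 ha
        exact (List.mem_filter.1 this).2
      have hvb : pvIsVipA b = false := by
        have := (PySem.List.mem_sorted _ _ _ _).1 hb
        simpa using (List.mem_filter.1 this).2
      simp [pvKey, hva, hvb, Prod.Lex.le_iff]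

-- B's count fold is the number of VIPs
theorem pvCut_eq_countP (xs : List String) :
    xs.foldl
      (fun acc g => if ((PySem.Str.pyGet? g 0).map PySem.Chars.isdigit).getD false then acc + 1 else acc)
      (0 : Int)
      = (xs.countP pvIsVipA : Int) := by
  have := PySem.List.foldl_count_if pvIsVipA xs 0
  simpa [pvIsVipA] using this

-- ===== VERDICT (by name: the statement is the Claim_ definition above) =====
theorem separate_guests_spec : Claim_equal_separate_guests := by
  intro guests _ _
  unfold Spec_separate_guests
  simp only [separate_guests, separate_guests_alt]
  rw [pvFold_partition, pvSorted2_eq_sorted_key, pvSorted_key_eq_append, pvCut_eq_countP]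
  simp only [List.nil_append]
  have hlen : (PySem.List.sorted (guests.filter pvIsVipA) (fun x => x) false).length
      = guests.countP pvIsVipA := by
    rw [PySem.List.length_sorted, List.countP_eq_length_filter]
  rw [PySem.List.slice_to _ (Int.natCast_nonneg _),
    PySem.List.slice_from _ (Int.natCast_nonneg _)]
  rw [Int.toNat_natCast, List.take_left' hlen, List.drop_left' hlen]
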